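-- pv_equiv track=rewrite | github.com/riddhimanrana/usaco-solutions | Silver/dec 24-25/Cake Game.py | calculate_cake_distribution
-- ===== SOURCE A (Python) =====
-- def calculate_cake_distribution(cake_sizes):
--     total_cakes = len(cake_sizes)
--     total_cake_size = sum(cake_sizes)
--     elsie_turns = total_cakes // 2 - 1
--
--     if elsie_turns < 0:
--         return [total_cake_size, 0]
--
--     cumulative_sum = [0] * (total_cakes + 1)
--     for i in range(1, total_cakes + 1):
--         cumulative_sum[i] = cumulative_sum[i - 1] + cake_sizes[i - 1]
--
--     max_left_sum = [0] * (elsie_turns + 1)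
--     max_right_sum = [0] * (elsie_turns + 1)
--
--     for i in range(1, elsie_turns + 1):
--         max_left_sum[i] = cumulative_sum[i]
--         max_right_sum[i] = cumulative_sum[total_cakes] - cumulative_sum[total_cakes - i]
--
--     max_elsie_share = float('-inf')
--     for left in range(elsie_turns + 1):
--         right = elsie_turns - left
--         current_sum = max_left_sum[left] + max_right_sum[right]
--         max_elsie_share = max(max_elsie_share, current_sum)
--
--     bessie_share = total_cake_size - max_elsie_share
--     return [bessie_share, max_elsie_share]
-- ===== SOURCE B (Python) =====
-- def calculate_cake_distribution(cake_sizes):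
--     n = len(cake_sizes)
--     total = sum(cake_sizes)
--     k = n // 2 - 1
--     if k < 0:
--         return [total, 0]
--     # Bessie gets the contiguous middle window of length L = n - k that Elsie
--     # leaves behind; slide that window once and keep its minimum sum.
--     L = n - k
--     w = sum(cake_sizes[:L])
--     m = w
--     for i in range(L, n):
--         w += cake_sizes[i] - cake_sizes[i - L]
--         if w < m:
--             m = w
--     return [m, total - m]
-- ===== Notes on version B (the rewrite author's own statement) =====
-- stated objective: simpler
-- what changed: Replaces A's prefix-sum array, two side tables and a max-over-splits loop by a single sliding-window pass that minimizes the sum of the length-(n - (n//2 - 1)) middle window Bessie receives; same O(n) but no intermediate lists.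
import Mathlib
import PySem

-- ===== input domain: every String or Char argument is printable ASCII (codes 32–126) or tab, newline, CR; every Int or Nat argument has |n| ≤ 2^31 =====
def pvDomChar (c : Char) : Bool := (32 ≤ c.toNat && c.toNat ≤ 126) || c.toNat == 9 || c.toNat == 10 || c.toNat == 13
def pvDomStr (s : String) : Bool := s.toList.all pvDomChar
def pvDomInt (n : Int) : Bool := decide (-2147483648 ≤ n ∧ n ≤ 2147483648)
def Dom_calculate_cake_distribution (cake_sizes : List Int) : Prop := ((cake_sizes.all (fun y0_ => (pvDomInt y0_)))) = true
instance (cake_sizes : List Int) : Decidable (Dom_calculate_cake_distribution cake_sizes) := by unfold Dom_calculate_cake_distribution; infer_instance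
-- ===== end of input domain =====

-- B replaces A's prefix-sum array, two side tables and a max-over-splits loop by a
-- single sliding-window minimum over the middle window Bessie receives (objective: simpler).


-- ===== PORT A =====
def calculate_cake_distribution (cake_sizes : List Int) : List Int :=
  let total_cakes : Int := PySem.List.len cake_sizes
  let total_cake_size : Int := cake_sizes.sum
  let elsie_turns : Int := PySem.Int.floordiv total_cakes 2 - 1
  if elsie_turns < 0 then [total_cake_size, 0]
  else
    let cumulative_sum :=
      (PySem.List.pyRange 1 (total_cakes + 1) 1).foldl
        (fun cs i => PySem.List.pySetD cs i
          (PySem.List.pyGetD cs (i - 1) 0 + PySem.List.pyGetD cake_sizes (i - 1) 0))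
        (List.replicate (total_cakes + 1).toNat (0 : Int))
    let max_left_sum :=
      (PySem.List.pyRange 1 (elsie_turns + 1) 1).foldl
        (fun ms i => PySem.List.pySetD ms i (PySem.List.pyGetD cumulative_sum i 0))
        (List.replicate (elsie_turns + 1).toNat (0 : Int))
    let max_right_sum :=
      (PySem.List.pyRange 1 (elsie_turns + 1) 1).foldl
        (fun ms i => PySem.List.pySetD ms i
          (PySem.List.pyGetD cumulative_sum total_cakes 0
            - PySem.List.pyGetD cumulative_sum (total_cakes - i) 0))
        (List.replicate (elsie_turns + 1).toNat (0 : Int))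
    -- float('-inf') as the initial max is modelled by Option Int (none = -inf); the
    -- final loop runs at least once here (elsie_turns ≥ 0), so .getD 0 is never used.
    let max_elsie_share :=
      (PySem.List.pyRange 0 (elsie_turns + 1) 1).foldl
        (fun acc left =>
          let right := elsie_turns - left
          let current_sum := PySem.List.pyGetD max_left_sum left 0
            + PySem.List.pyGetD max_right_sum right 0
          match acc with
          | none => some current_sum
          | some m => some (max m current_sum))
        (none : Option Int)
    let mes := max_elsie_share.getD 0
    [total_cake_size - mes, mes]

-- ===== PORT B =====
def calculate_cake_distribution_alt (cake_sizes : List Int) : List Int :=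
  let n := cake_sizes.length
  let total : Int := cake_sizes.sum
  let k : Int := PySem.Int.floordiv (n : Int) 2 - 1
  if k < 0 then [total, 0]
  else
    let L : Int := (n : Int) - k
    let w0 : Int := (cake_sizes.take L.toNat).sum
    let p :=
      (PySem.List.pyRange L (n : Int) 1).foldl
        (fun (p : Int × Int) i =>
          let w := p.2 + PySem.List.pyGetD cake_sizes i 0
                       - PySem.List.pyGetD cake_sizes (i - L) 0
          (if w < p.1 then w else p.1, w))
        (w0, w0)
    [p.1, total - p.1]

-- ===== PRECONDITION & SPEC =====
def Spec_calculate_cake_distribution (cake_sizes : List Int) (out : List Int) : Prop := out = calculate_cake_distribution_alt cake_sizes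
instance (cake_sizes : List Int) (out : List Int) : Decidable (Spec_calculate_cake_distribution cake_sizes out) := by unfold Spec_calculate_cake_distribution; infer_instance

-- ===== CLAIM (what is proved, stated in full; the proofs are below) =====
def Claim_equal_calculate_cake_distribution : Prop := ∀ (cake_sizes : List Int), Dom_calculate_cake_distribution cake_sizes → Spec_calculate_cake_distribution cake_sizes (calculate_cake_distribution cake_sizes)

-- ===== LEMMAS AND PROOFS =====

-- prefix sum of the first j elements
def pvS (cs : List Int) (j : Nat) : Int := (cs.take j).sum
-- sum of the length-L window starting at j
def pvW (cs : List Int) (L j : Nat) : Int := pvS cs (j + L) - pvS cs j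

def pvRunMin (f : Nat → Int) : Nat → Int
  | 0 => f 0
  | t+1 => min (pvRunMin f t) (f (t+1))

def pvRunMax (f : Nat → Int) : Nat → Int
  | 0 => f 0
  | t+1 => max (pvRunMax f t) (f (t+1))

theorem pvRunMax_congr (f g : Nat → Int) (t : Nat) (h : ∀ j ≤ t, f j = g j) :
    pvRunMax f t = pvRunMax g t := by
  induction t with
  | zero => simpa [pvRunMax] using h 0 (le_refl 0)
  | succ t ih =>
      simp only [pvRunMax]
      rw [ih (fun j hj => h j (Nat.le_succ_of_le hj)), h (t+1) (le_refl _)]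

theorem pvRunMax_sub (c : Int) (f : Nat → Int) (t : Nat) :
    pvRunMax (fun j => c - f j) t = c - pvRunMin f t := by
  induction t with
  | zero => simp [pvRunMax, pvRunMin]
  | succ t ih => simp only [pvRunMax, pvRunMin, ih]; omega

theorem pv_set_map_range (f : Nat → Int) (len t : Nat) (v : Int) :
    ((List.range len).map f).set t v
      = (List.range len).map (fun j => if j = t then v else f j) := by
  apply List.ext_getElem
  · simp
  · intro i h1 h2
    simp only [List.getElem_set, List.getElem_map, List.getElem_range]
    rcases eq_or_ne t i with hit | hit
    · simp [hit]
    · simp [hit, Ne.symm hit]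

theorem pvS_succ (cs : List Int) (j : Nat) (h : j < cs.length) :
    pvS cs (j+1) = pvS cs j + cs[j] := by
  simp [pvS, List.sum_take_succ cs j h]

-- characterization of A's cumulative_sum loop
theorem pv_cum (cs : List Int) (t : Nat) (ht : t ≤ cs.length) :
    (PySem.List.pyRange 1 ((t:Int) + 1) 1).foldl
        (fun acc i => PySem.List.pySetD acc i
          (PySem.List.pyGetD acc (i - 1) 0 + PySem.List.pyGetD cs (i - 1) 0))
        (List.replicate (cs.length + 1) (0 : Int))
      = (List.range (cs.length + 1)).map (fun j => if j ≤ t then pvS cs j else 0) := by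
  induction t with
  | zero =>
      rw [show ((0:Nat):Int) + 1 = 1 by norm_num, PySem.List.pyRange_one_eq_nil (by norm_num)]
      simp only [List.foldl_nil]
      apply List.ext_getElem (by simp)
      intro i h1 h2
      simp only [List.getElem_replicate, List.getElem_map, List.getElem_range]
      split_ifs with h
      · have : i = 0 := by omega
        subst this; simp [pvS]
      · rfl
  | succ t ih =>
      rw [show ((t+1:Nat):Int) + 1 = ((t:Int) + 1) + 1 by push_cast; ring,
          PySem.List.pyRange_one_succ_right (by omega),
          List.foldl_append, ih (by omega)]
      simp only [List.foldl_cons, List.foldl_nil]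
      rw [show ((t:Int) + 1 - 1) = ((t:Nat):Int) by ring,
          show ((t:Int) + 1) = ((t+1:Nat):Int) by push_cast; ring,
          PySem.List.pyGetD_natCast, PySem.List.pyGetD_natCast,
          PySem.List.pySetD_natCast,
          PySem.List.getD_map_range _ _ _ _ (by omega),
          if_pos (le_refl t),
          List.getD_eq_getElem cs 0 (by omega),
          ← pvS_succ cs t (by omega),
          pv_set_map_range]
      apply List.map_congr_left
      intro j hj
      rcases eq_or_ne j (t+1) with hjt | hjt
      · subst hjt
        rw [if_pos rfl, if_pos (le_refl (t+1))]
      · rw [if_neg hjt]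
        split_ifs with h1 h2 h2 <;> first | rfl | omega

-- characterization of A's two table-filling loops
theorem pv_fill (g : Int → Int) (len : Nat) (b : Nat) (hb : b ≤ len) :
    (PySem.List.pyRange 1 (b:Int) 1).foldl
        (fun ms i => PySem.List.pySetD ms i (g i))
        (List.replicate len (0 : Int))
      = (List.range len).map (fun j => if 1 ≤ j ∧ j < b then g (j:Int) else 0) := by
  induction b with
  | zero =>
      rw [PySem.List.pyRange_one_eq_nil (by norm_num)]
      simp
  | succ b ih =>
      rcases Nat.eq_zero_or_pos b with hb0 | hb1
      · subst hb0
        rw [show ((1:Nat):Int) = 1 by norm_num, PySem.List.pyRange_one_eq_nil (by norm_num)]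
        simp only [List.foldl_nil]
        apply List.ext_getElem (by simp)
        intro i h1 h2
        simp only [List.getElem_replicate, List.getElem_map, List.getElem_range]
        split_ifs with h
        · omega
        · rfl
      · rw [show ((b+1:Nat):Int) = (b:Int) + 1 by push_cast; ring,
            PySem.List.pyRange_one_succ_right (by exact_mod_cast hb1),
            List.foldl_append, ih (by omega)]
        simp only [List.foldl_cons, List.foldl_nil, PySem.List.pySetD_natCast,
          pv_set_map_range]
        apply List.map_congr_left
        intro j hj
        rcases eq_or_ne j b with hjb | hjb
        · subst hjb
          rw [if_pos rfl, if_pos ⟨hb1, Nat.lt_succ_self j⟩]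
        · rw [if_neg hjb]
          split_ifs with h1 h2 h2 <;> first | rfl | omega

-- A's final max loop
theorem pv_maxloop (f : Int → Int) (t : Nat) :
    (PySem.List.pyRange 0 ((t:Int) + 1) 1).foldl
        (fun acc left => match acc with
          | none => some (f left)
          | some m => some (max m (f left)))
        (none : Option Int)
      = some (pvRunMax (fun j => f (j:Int)) t) := by
  induction t with
  | zero =>
      rw [show ((0:Nat):Int) + 1 = 0 + 1 by norm_num, PySem.List.pyRange_one_singleton]
      simp [pvRunMax]
  | succ t ih =>
      rw [show ((t+1:Nat):Int) + 1 = ((t:Int) + 1) + 1 by push_cast; ring,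
          PySem.List.pyRange_one_succ_right (by omega),
          List.foldl_append, ih]
      simp only [List.foldl_cons, List.foldl_nil, pvRunMax]
      norm_num

-- B's sliding-window loop
theorem pv_minloop (cs : List Int) (L : Nat) (t : Nat) (h : L + t ≤ cs.length) :
    (PySem.List.pyRange (L:Int) ((L:Int) + (t:Int)) 1).foldl
        (fun (p : Int × Int) i =>
          (if p.2 + PySem.List.pyGetD cs i 0 - PySem.List.pyGetD cs (i - (L:Int)) 0 < p.1
            then p.2 + PySem.List.pyGetD cs i 0 - PySem.List.pyGetD cs (i - (L:Int)) 0
            else p.1,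
           p.2 + PySem.List.pyGetD cs i 0 - PySem.List.pyGetD cs (i - (L:Int)) 0))
        (pvS cs L, pvS cs L)
      = (pvRunMin (pvW cs L) t, pvW cs L t) := by
  induction t with
  | zero =>
      rw [show ((L:Int) + ((0:Nat):Int)) = (L:Int) by norm_num,
          PySem.List.pyRange_one_eq_nil (le_refl _)]
      simp [pvRunMin, pvW, pvS]
  | succ t ih =>
      rw [show ((L:Int) + ((t+1:Nat):Int)) = ((L:Int) + (t:Int)) + 1 by push_cast; ring,
          PySem.List.pyRange_one_succ_right (by omega),
          List.foldl_append, ih (by omega)]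
      simp only [List.foldl_cons, List.foldl_nil]
      rw [show ((L:Int) + (t:Int)) = ((L+t:Nat):Int) by push_cast; ring,
          show ((L+t:Nat):Int) - (L:Int) = ((t:Nat):Int) by push_cast; ring,
          PySem.List.pyGetD_natCast, PySem.List.pyGetD_natCast]
      have hw : pvW cs L t + cs.getD (L+t) 0 - cs.getD t 0 = pvW cs L (t+1) := by
        simp only [pvW]
        rw [show L + t = t + L from Nat.add_comm L t,
            List.getD_eq_getElem cs 0 (show t + L < cs.length by omega),
            List.getD_eq_getElem cs 0 (show t < cs.length by omega),
            show t + 1 + L = (t + L) + 1 by ring, pvS_succ cs (t+L) (by omega),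
            pvS_succ cs t (by omega)]
        ring
      rw [hw]
      simp only [pvRunMin]
      rw [min_def]
      split_ifs <;> first | rfl | omega


theorem pv_B_main (cs : List Int) (h2 : 2 ≤ cs.length) :
    calculate_cake_distribution_alt cs
      = [pvRunMin (pvW cs (cs.length - (cs.length/2 - 1))) (cs.length/2 - 1),
         cs.sum - pvRunMin (pvW cs (cs.length - (cs.length/2 - 1))) (cs.length/2 - 1)] := by
  have hk : PySem.Int.floordiv ((cs.length : Int)) 2 - 1 = ((cs.length/2 - 1 : Nat) : Int) := by
    rw [PySem.Int.floordiv_eq_ediv_of_pos (by norm_num)]; omega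
  simp only [calculate_cake_distribution_alt, hk]
  rw [if_neg (by omega)]
  have hL : ((cs.length : Int)) - ((cs.length/2 - 1 : Nat) : Int) = ((cs.length - (cs.length/2 - 1) : Nat) : Int) := by omega
  rw [hL,
      show ((cs.length:Int)) = ((cs.length - (cs.length/2 - 1) : Nat):Int) + ((cs.length/2 - 1 : Nat):Int) by omega]
  simp only [Int.toNat_natCast]
  rw [show (List.take (cs.length - (cs.length/2 - 1)) cs).sum = pvS cs (cs.length - (cs.length/2 - 1)) from rfl,
      pv_minloop cs (cs.length - (cs.length/2 - 1)) (cs.length/2 - 1) (by omega)]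

theorem pv_maxval (cs : List Int) (h2 : 2 ≤ cs.length) :
    pvRunMax (fun j : Nat =>
      PySem.List.pyGetD
        (List.map (fun j => if 1 ≤ j ∧ j < cs.length / 2 - 1 + 1 then
            PySem.List.pyGetD (List.map (fun j => if j ≤ cs.length then pvS cs j else 0) (List.range (cs.length + 1))) (↑j) 0
          else 0) (List.range (cs.length / 2 - 1 + 1))) (↑j) 0
      + PySem.List.pyGetD
        (List.map (fun j => if 1 ≤ j ∧ j < cs.length / 2 - 1 + 1 then
            PySem.List.pyGetD (List.map (fun j => if j ≤ cs.length then pvS cs j else 0) (List.range (cs.length + 1))) (↑cs.length) 0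
            - PySem.List.pyGetD (List.map (fun j => if j ≤ cs.length then pvS cs j else 0) (List.range (cs.length + 1))) (↑cs.length - ↑j) 0
          else 0) (List.range (cs.length / 2 - 1 + 1))) (↑(cs.length / 2 - 1) - ↑j) 0)
      (cs.length / 2 - 1)
    = pvRunMax (fun j => cs.sum - pvW cs (cs.length - (cs.length / 2 - 1)) j) (cs.length / 2 - 1) := by
  apply pvRunMax_congr
  intro j hj
  rw [PySem.List.pyGetD_natCast,
      show ((cs.length/2 - 1 : Nat):Int) - (j:Int) = ((cs.length/2 - 1 - j : Nat):Int) by omega,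
      PySem.List.pyGetD_natCast]
  rw [PySem.List.getD_map_range _ _ _ _ (show j < cs.length/2 - 1 + 1 by omega),
      PySem.List.getD_map_range _ _ _ _ (show cs.length/2 - 1 - j < cs.length/2 - 1 + 1 by omega)]
  rw [show ((cs.length:Int)) - ((cs.length/2 - 1 - j : Nat):Int) = ((cs.length - (cs.length/2 - 1 - j) : Nat):Int) by omega]
  simp only [PySem.List.pyGetD_natCast]
  rw [PySem.List.getD_map_range _ _ _ _ (show j < cs.length + 1 by omega),
      PySem.List.getD_map_range _ _ _ _ (show cs.length < cs.length + 1 by omega),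
      PySem.List.getD_map_range _ _ _ _ (show cs.length - (cs.length/2 - 1 - j) < cs.length + 1 by omega)]
  rw [if_pos (show j ≤ cs.length by omega), if_pos (le_refl cs.length),
      if_pos (show cs.length - (cs.length/2 - 1 - j) ≤ cs.length by omega)]
  have hSn : pvS cs cs.length = cs.sum := by simp [pvS]
  have hidx : cs.length - (cs.length/2 - 1 - j) = j + (cs.length - (cs.length/2 - 1)) := by omega
  rw [hidx, hSn]
  simp only [pvW]
  split_ifs with h1 h2 h2
  · ring
  · have hjk : j + (cs.length - (cs.length/2 - 1)) = cs.length := by omega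
    rw [hjk, hSn]; ring
  · have hj0 : j = 0 := by omega
    subst hj0; simp [pvS]
  · have hj0 : j = 0 := by omega
    subst hj0
    have hL0 : 0 + (cs.length - (cs.length/2 - 1)) = cs.length := by omega
    rw [hL0, hSn]
    simp [pvS]

theorem pv_A_main (cs : List Int) (h2 : 2 ≤ cs.length) :
    calculate_cake_distribution cs
      = [cs.sum - (cs.sum - pvRunMin (pvW cs (cs.length - (cs.length/2 - 1))) (cs.length/2 - 1)),
         cs.sum - pvRunMin (pvW cs (cs.length - (cs.length/2 - 1))) (cs.length/2 - 1)] := by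
  have hk : PySem.Int.floordiv ((cs.length : Int)) 2 - 1 = ((cs.length/2 - 1 : Nat) : Int) := by
    rw [PySem.Int.floordiv_eq_ediv_of_pos (by norm_num)]; omega
  simp only [calculate_cake_distribution, PySem.List.len_eq, hk]
  rw [if_neg (by omega)]
  rw [show ((cs.length:Int) + 1).toNat = cs.length + 1 by omega]
  rw [pv_cum cs cs.length (le_refl _)]
  rw [show ((cs.length/2 - 1 : Nat):Int) + 1 = ((cs.length/2 - 1 + 1 : Nat):Int) by push_cast; ring]
  simp only [Int.toNat_natCast]
  rw [pv_fill _ _ (cs.length/2 - 1 + 1) (le_refl _),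
      pv_fill _ _ (cs.length/2 - 1 + 1) (le_refl _)]
  rw [show ((cs.length/2 - 1 + 1 : Nat):Int) = ((cs.length/2 - 1 : Nat):Int) + 1 by push_cast; ring]
  rw [pv_maxloop _ (cs.length/2 - 1)]
  rw [pv_maxval cs h2, pvRunMax_sub]
  simp

-- ===== VERDICT (by name: the statement is the Claim_ definition above) =====
theorem calculate_cake_distribution_spec : Claim_equal_calculate_cake_distribution := by
  intro cs _
  unfold Spec_calculate_cake_distribution
  by_cases h2 : 2 ≤ cs.length
  · rw [pv_A_main cs h2, pv_B_main cs h2]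
    simp only [List.cons.injEq, and_true]
    ring
  · have hc : PySem.Int.floordiv ((cs.length : Int)) 2 - 1 < 0 := by
      rw [PySem.Int.floordiv_eq_ediv_of_pos (by norm_num)]; omega
    simp only [calculate_cake_distribution, calculate_cake_distribution_alt, PySem.List.len_eq]
    rw [if_pos hc, if_pos hc]
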